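-- pv_equiv track=rewrite | github.com/SwiftyKey/Study | 4 курс 7 семестр/Проектирование/Лаба 1-4/task2.py | expand_binomial
-- ===== SOURCE A (Python) =====
-- def binomial_coefficient(m, n):
--     if m < 0 or m > n:
--         return 0
--     if m == 0 or m == n:
--         return 1
--
--     m = min(m, n - m)
--     result = 1
--     for i in range(m):
--         result = result * (n - i) // (i + 1)
--     return result
--
-- def format_power(base, exp):
--     if exp == 0:
--         return ""
--     elif exp == 1:
--         return base
--     else:
--         return f"{base}^{exp}"
--
-- def format_term(m, n, a, b):
--     coeff = binomial_coefficient(m, n)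
--     power_a = n - m
--     power_b = m
--
--     term_a = format_power(a, power_a)
--     term_b = format_power(b, power_b)
--
--     parts = []
--     if coeff != 1 or (not term_a and not term_b):
--         if coeff == 1 and n == 0:
--             parts.append("1")
--         elif coeff != 1:
--             parts.append(str(coeff))
--     if term_a:
--         parts.append(term_a)
--     if term_b:
--         parts.append(term_b)
--
--     return "·".join(parts)
--
-- def expand_binomial(a, b, n):
--     if n == 0:
--         return "1"
--     terms = []
--     for m in range(n + 1):
--         term = format_term(m, n, a, b)
--         if term:
--             terms.append(term)
--     return " + ".join(terms)
-- ===== SOURCE B (Python) =====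
-- def _pow(base, exp):
--     if exp == 0:
--         return ""
--     if exp == 1:
--         return base
--     return f"{base}^{exp}"
--
-- def expand_binomial(a, b, n):
--     if n == 0:
--         return "1"
--     terms = []
--     c = 1  # running binomial coefficient C(n, m), updated by Pascal's ratio
--     for m in range(n + 1):
--         parts = []
--         if c != 1:
--             parts.append(str(c))
--         pa = _pow(a, n - m)
--         if pa:
--             parts.append(pa)
--         pb = _pow(b, m)
--         if pb:
--             parts.append(pb)
--         if parts:
--             terms.append("·".join(parts))
--         c = c * (n - m) // (m + 1)
--     return " + ".join(terms)
-- ===== Notes on version B (the rewrite author's own statement) =====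
-- stated objective: faster
-- what changed: Instead of recomputing each binomial coefficient from scratch with an inner product loop, B carries one running coefficient updated by Pascal's ratio c = c*(n-m)//(m+1) in a single pass; intended as faster (O(n) vs O(n^2) big-int multiplications), measured 3.4-4.9x on the sizes both finish (output size itself is quadratic, so neither finishes the largest probe).
import Mathlib
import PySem

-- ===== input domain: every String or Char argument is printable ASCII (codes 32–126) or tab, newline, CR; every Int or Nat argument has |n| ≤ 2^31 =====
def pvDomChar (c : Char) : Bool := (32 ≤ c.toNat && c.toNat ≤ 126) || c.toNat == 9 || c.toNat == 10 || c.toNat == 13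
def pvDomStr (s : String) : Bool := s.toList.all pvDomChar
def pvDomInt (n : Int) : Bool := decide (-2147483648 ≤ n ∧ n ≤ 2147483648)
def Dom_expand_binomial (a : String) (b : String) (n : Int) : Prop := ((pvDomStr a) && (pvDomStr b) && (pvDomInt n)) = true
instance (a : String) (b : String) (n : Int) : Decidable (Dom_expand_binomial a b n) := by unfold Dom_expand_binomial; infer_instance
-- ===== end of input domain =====

-- B replaces A's per-term recomputation of each binomial coefficient (an inner product loop)
-- by one running coefficient updated with Pascal's ratio c = c*(n-m)//(m+1) in a single pass;
-- intended as faster, measured ~3.4-4.9x at the probe sizes both implementations finish.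

-- ===== PORT A =====
def pvBinomialCoefficient (m n : Int) : Int :=
  if m < 0 ∨ n < m then 0
  else if m = 0 ∨ m = n then 1
  else
    (PySem.List.pyRange 0 (min m (n - m)) 1).foldl
      (fun result i => PySem.Int.floordiv (result * (n - i)) (i + 1)) 1

def pvFormatPower (base : String) (exp : Int) : String :=
  if exp = 0 then ""
  else if exp = 1 then base
  else PySem.Str.join "" [base, "^", PySem.Int.toStr exp]   -- f"{base}^{exp}"

def pvFormatTerm (m n : Int) (a b : String) : String :=
  let coeff := pvBinomialCoefficient m n
  let term_a := pvFormatPower a (n - m)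
  let term_b := pvFormatPower b m
  let parts : List String :=
    ((if coeff ≠ 1 ∨ (term_a = "" ∧ term_b = "") then
        (if coeff = 1 ∧ n = 0 then ["1"]
         else if coeff ≠ 1 then [PySem.Int.toStr coeff] else [])
      else [])
     ++ (if term_a ≠ "" then [term_a] else [])
     ++ (if term_b ≠ "" then [term_b] else []))
  PySem.Str.join "·" parts

def expand_binomial (a : String) (b : String) (n : Int) : String :=
  if n = 0 then "1"
  else
    PySem.Str.join " + "
      ((PySem.List.pyRange 0 (n + 1) 1).foldl
        (fun terms m =>
          let term := pvFormatTerm m n a b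
          if term ≠ "" then terms ++ [term] else terms) [])

-- ===== PORT B =====
def pvPow (base : String) (exp : Int) : String :=
  if exp = 0 then ""
  else if exp = 1 then base
  else PySem.Str.join "" [base, "^", PySem.Int.toStr exp]   -- f"{base}^{exp}"

-- one iteration of B's single loop: state = (terms so far, running coefficient c)
def pvStepB (n : Int) (a b : String) (st : List String × Int) (m : Int) : List String × Int :=
  let parts : List String :=
    (if st.2 ≠ 1 then [PySem.Int.toStr st.2] else [])
    ++ (let pa := pvPow a (n - m); if pa ≠ "" then [pa] else [])
    ++ (let pb := pvPow b m; if pb ≠ "" then [pb] else [])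
  (if parts ≠ [] then st.1 ++ [PySem.Str.join "·" parts] else st.1,
   PySem.Int.floordiv (st.2 * (n - m)) (m + 1))

def expand_binomial_alt (a : String) (b : String) (n : Int) : String :=
  if n = 0 then "1"
  else
    PySem.Str.join " + "
      (((PySem.List.pyRange 0 (n + 1) 1).foldl (pvStepB n a b) ([], 1)).1)

-- ===== PRECONDITION & SPEC =====
def Spec_expand_binomial (a : String) (b : String) (n : Int) (out : String) : Prop := out = expand_binomial_alt a b n
instance (a : String) (b : String) (n : Int) (out : String) : Decidable (Spec_expand_binomial a b n out) := by unfold Spec_expand_binomial; infer_instance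

-- ===== CLAIM (what is proved, stated in full; the proofs are below) =====
def Claim_equal_expand_binomial : Prop := ∀ (a : String) (b : String) (n : Int), Dom_expand_binomial a b n → Spec_expand_binomial a b n (expand_binomial a b n)

-- ===== LEMMAS AND PROOFS =====

lemma pv_toDigits_ne_nil (n : Nat) : Nat.toDigits 10 n ≠ [] := by
  show (if n / 10 = 0 then [(n % 10).digitChar]
        else Nat.toDigitsCore 10 n (n / 10) [(n % 10).digitChar]) ≠ []
  split_ifs
  · simp
  · intro h
    have := Nat.toDigitsCore_lens_eq 10 n (n / 10) ((n % 10).digitChar) []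
    rw [h] at this
    simp at this

lemma pv_toStr_ne_empty (c : Int) : PySem.Int.toStr c ≠ "" := by
  intro h
  have h2 := congrArg String.toList h
  rw [PySem.Int.toList_toStr] at h2
  unfold PySem.Int.toChars at h2
  split_ifs at h2
  · simp at h2
  · exact pv_toDigits_ne_nil _ h2

lemma pv_join_ne_empty (p : String) (rest : List String) (hp : p ≠ "") :
    PySem.Str.join "·" (p :: rest) ≠ "" := by
  intro h
  have h2 := congrArg String.toList h
  rw [PySem.Str.toList_join] at h2
  cases rest with
  | nil =>
    simp [PySem.Chars.join, List.intercalate] at h2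
    exact hp h2
  | cons q rs =>
    rw [List.map_cons, List.map_cons, PySem.Chars.join_cons_cons] at h2
    simp at h2

-- one iteration of B equals one iteration of A when B's running coefficient
-- equals A's recomputed binomial coefficient (n ≠ 0 inside the loop)
lemma pv_stepB_fst (n m : Int) (a b : String) (terms : List String) (hn : n ≠ 0) :
    (pvStepB n a b (terms, pvBinomialCoefficient m n) m).1
      = (let term := pvFormatTerm m n a b
         if term ≠ "" then terms ++ [term] else terms) := by
  show (pvStepB n a b (terms, pvBinomialCoefficient m n) m).1
      = (if pvFormatTerm m n a b ≠ "" then terms ++ [pvFormatTerm m n a b] else terms)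
  unfold pvStepB pvFormatTerm
  have hpow : pvPow = pvFormatPower := rfl
  rw [hpow]
  set coeff := pvBinomialCoefficient m n with hc
  set ta := pvFormatPower a (n - m) with hta
  set tb := pvFormatPower b m with htb
  by_cases h1 : coeff = 1 <;> by_cases h2 : ta = "" <;> by_cases h3 : tb = ""
  · simp [h1, h2, h3, hn, PySem.Str.join, PySem.Chars.join, List.intercalate]
  · have hj := pv_join_ne_empty tb [] h3
    simp [h1, h2, h3, hj]
  · have hj := pv_join_ne_empty ta [] h2
    simp [h1, h2, h3, hj]
  · have hj := pv_join_ne_empty ta [tb] h2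
    simp [h1, h2, h3, hj]
  · have hj := pv_join_ne_empty (PySem.Int.toStr coeff) [] (pv_toStr_ne_empty coeff)
    simp [h1, h2, h3, hn, hj]
  · have hj := pv_join_ne_empty (PySem.Int.toStr coeff) [tb] (pv_toStr_ne_empty coeff)
    simp [h1, h2, h3, hn, hj]
  · have hj := pv_join_ne_empty (PySem.Int.toStr coeff) [ta] (pv_toStr_ne_empty coeff)
    simp [h1, h2, h3, hn, hj]
  · have hj := pv_join_ne_empty (PySem.Int.toStr coeff) [ta, tb] (pv_toStr_ne_empty coeff)
    simp [h1, h2, h3, hn, hj]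

-- the Pascal-ratio update is exact: C(n,k)*(n-k) // (k+1) = C(n,k+1)
lemma pv_choose_step (n k : Nat) (hk : k ≤ n) :
    PySem.Int.floordiv ((n.choose k : Int) * ((n : Int) - (k : Int))) ((k : Int) + 1)
      = (n.choose (k + 1) : Int) := by
  have h1 : (n : Int) - (k : Int) = ((n - k : Nat) : Int) := by
    omega
  rw [h1, ← Nat.cast_mul,
      show ((k : Int) + 1) = ((k + 1 : Nat) : Int) by push_cast; ring,
      PySem.Int.floordiv_natCast]
  congr 1
  rw [← Nat.choose_succ_right_eq]
  exact Nat.mul_div_cancel _ (Nat.succ_pos k)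

-- A's inner product loop computes the binomial coefficient
lemma pv_binom_fold (n : Nat) : ∀ k : Nat, k ≤ n →
    (PySem.List.pyRange 0 (k : Int) 1).foldl
      (fun result i => PySem.Int.floordiv (result * ((n : Int) - i)) (i + 1)) 1
      = (n.choose k : Int) := by
  intro k
  induction k with
  | zero => intro _; rw [PySem.List.pyRange_one_eq_nil (by omega)]; simp
  | succ k ih =>
    intro hk
    rw [show ((k + 1 : Nat) : Int) = (k : Int) + 1 by push_cast; ring,
        PySem.List.pyRange_one_succ_right (by omega), List.foldl_append,
        ih (by omega)]
    simpa using pv_choose_step n k (by omega)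

lemma pv_binom_eq_choose (n' m' : Nat) (h : m' ≤ n') :
    pvBinomialCoefficient (m' : Int) (n' : Int) = (n'.choose m' : Int) := by
  unfold pvBinomialCoefficient
  rw [if_neg (by omega)]
  by_cases h0 : (m' : Int) = 0 ∨ (m' : Int) = (n' : Int)
  · rw [if_pos h0]
    rcases h0 with h0 | h0
    · have : m' = 0 := by omega
      simp [this]
    · have : m' = n' := by omega
      simp [this]
  · rw [if_neg h0]
    have hm0 : 0 < m' := by omega
    have hmn : m' < n' := by omega
    have hmin : min (m' : Int) ((n' : Int) - (m' : Int)) = ((min m' (n' - m') : Nat) : Int) := by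
      omega
    rw [hmin, pv_binom_fold n' (min m' (n' - m')) (by omega)]
    congr 1
    rcases le_total m' (n' - m') with hle | hle
    · rw [min_eq_left hle]
    · rw [min_eq_right hle]
      exact Nat.choose_symm h

-- loop invariant: starting at index k with running coefficient C(n,k),
-- B's fold produces exactly A's list of terms
lemma pv_loop_eq (a b : String) (n' : Nat) : ∀ d k : Nat, k + d = n' + 1 → 0 < n' →
    ∀ terms : List String,
    ((PySem.List.pyRange (k : Int) ((n' : Int) + 1) 1).foldl (pvStepB (n' : Int) a b)
        (terms, (n'.choose k : Int))).1
      = (PySem.List.pyRange (k : Int) ((n' : Int) + 1) 1).foldl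
          (fun terms m =>
            let term := pvFormatTerm m (n' : Int) a b
            if term ≠ "" then terms ++ [term] else terms) terms := by
  intro d
  induction d with
  | zero =>
    intro k hk _ terms
    rw [PySem.List.pyRange_one_eq_nil (by omega)]
    rfl
  | succ d ih =>
    intro k hk hn terms
    have hklt : (k : Int) < (n' : Int) + 1 := by omega
    rw [PySem.List.pyRange_one_cons hklt]
    simp only [List.foldl_cons]
    have hstep : pvStepB (n' : Int) a b (terms, (n'.choose k : Int)) (k : Int)
        = ((fun terms m =>
              let term := pvFormatTerm m (n' : Int) a b
              if term ≠ "" then terms ++ [term] else terms) terms (k : Int),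
           (n'.choose (k + 1) : Int)) := by
      have hfst := pv_stepB_fst (n' : Int) (k : Int) a b terms (by omega)
      rw [pv_binom_eq_choose n' k (by omega)] at hfst
      have hsnd : (pvStepB (n' : Int) a b (terms, (n'.choose k : Int)) (k : Int)).2
          = (n'.choose (k + 1) : Int) := by
        show PySem.Int.floordiv ((n'.choose k : Int) * ((n' : Int) - (k : Int))) ((k : Int) + 1)
            = (n'.choose (k + 1) : Int)
        exact pv_choose_step n' k (by omega)
      exact Prod.ext hfst hsnd
    rw [hstep]
    have hcast : (k : Int) + 1 = ((k + 1 : Nat) : Int) := by push_cast; ring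
    rw [hcast]
    exact ih (k + 1) (by omega) hn _

-- ===== VERDICT (by name: the statement is the Claim_ definition above) =====
theorem expand_binomial_spec : Claim_equal_expand_binomial := by
  intro a b n _
  unfold Spec_expand_binomial expand_binomial expand_binomial_alt
  by_cases h0 : n = 0
  · simp [h0]
  rw [if_neg h0, if_neg h0]
  rcases lt_trichotomy n 0 with hneg | hz | hpos
  · rw [PySem.List.pyRange_one_eq_nil (by omega)]
    rfl
  · exact absurd hz h0
  · have hn' : n = ((n.toNat : Nat) : Int) := by omega
    have hpos' : 0 < n.toNat := by omega
    rw [hn']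
    have := pv_loop_eq a b n.toNat (n.toNat + 1) 0 (by omega) hpos' []
    simp only [Nat.cast_zero, Nat.choose_zero_right, Nat.cast_one] at this
    rw [this]
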